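-- pv_equiv track=rewrite | github.com/shollingsworth/v0tools | src/v0tools/tests.py | split_wordbreak
-- ===== SOURCE A (Python) =====
-- COMP_WORDBREAKS = [
--     " ",
--     "\t",
--     "\n",
--     '"',
--     "'",
--     ">",
--     "<",
--     "=",
--     ";",
--     "|",
--     "&",
--     "(",
--     ":",
--     "\n",
-- ]
--
-- def split_wordbreak(command):
--     """Split Bash Autcomplete by wordbreak."""
--     vals = []
--     for letter in command:
--         if letter in COMP_WORDBREAKS:
--             vals.append(" ")
--             vals.append(letter)
--             vals.append(" ")
--         else:
--             vals.append(letter)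
--     comp_line = "".join(vals).split()
--     return " ".join(comp_line), len(comp_line) - 1
-- ===== SOURCE B (Python) =====
-- _WB = {'"', "'", ">", "<", "=", ";", "|", "&", "(", ":"}
--
-- def split_wordbreak(command):
--     """Split Bash Autcomplete by wordbreak (single-pass tokenizer)."""
--     tokens = []
--     buf = []
--     for letter in command:
--         if letter in _WB:
--             if buf:
--                 tokens.append("".join(buf))
--                 buf = []
--             tokens.append(letter)
--         elif letter.isspace():
--             if buf:
--                 tokens.append("".join(buf))
--                 buf = []
--         else:
--             buf.append(letter)
--     if buf:
--         tokens.append("".join(buf))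
--     return " ".join(tokens), len(tokens) - 1
-- ===== Notes on version B (the rewrite author's own statement) =====
-- stated objective: alternative
-- what changed: Replaces A's strategy of padding wordbreak characters with spaces, joining into one big string, and re-splitting with str.split() by a single-pass tokenizer that maintains an explicit current-token buffer and emits tokens directly.
import Mathlib
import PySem

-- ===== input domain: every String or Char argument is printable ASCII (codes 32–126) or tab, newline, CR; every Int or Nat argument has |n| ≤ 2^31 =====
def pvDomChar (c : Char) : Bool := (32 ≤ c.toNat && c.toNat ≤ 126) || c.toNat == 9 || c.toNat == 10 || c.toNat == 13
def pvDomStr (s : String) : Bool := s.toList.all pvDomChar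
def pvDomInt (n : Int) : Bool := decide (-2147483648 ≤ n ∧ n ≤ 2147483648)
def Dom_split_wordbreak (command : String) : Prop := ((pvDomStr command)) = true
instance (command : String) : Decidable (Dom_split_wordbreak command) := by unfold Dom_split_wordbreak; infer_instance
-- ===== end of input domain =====

-- B replaces A's pad-with-spaces-then-str.split() strategy by a single-pass tokenizer with an
-- explicit current-token buffer (objective: alternative decomposition, same cost).

-- ===== PORT A =====
-- COMP_WORDBREAKS, a module constant of A
def compWordbreaks : List Char :=
  [' ', '\t', '\n', '"', '\'', '>', '<', '=', ';', '|', '&', '(', ':', '\n']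

-- the body of A's for-loop: append ' ', letter, ' ' (or just letter) to vals
def aStep (acc : List Char) (letter : Char) : List Char :=
  if letter ∈ compWordbreaks then acc ++ [' '] ++ [letter] ++ [' '] else acc ++ [letter]

def split_wordbreak (command : String) : String × Int :=
  let vals : List Char := command.toList.foldl aStep []
  let comp_line := PySem.Chars.split₀ vals
  (String.ofList (PySem.Chars.join [' '] comp_line), (comp_line.length : Int) - 1)

-- ===== PORT B =====
-- B's non-whitespace wordbreak set _WB
def wbSet : List Char := ['"', '\'', '>', '<', '=', ';', '|', '&', '(', ':']

-- B's loop: explicit buffer `buf` and token list `tokens`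
def bGo : List Char → List Char → List (List Char) → List (List Char)
  | [], buf, tokens => if buf.isEmpty then tokens else tokens ++ [buf]
  | c :: rest, buf, tokens =>
    if c ∈ wbSet then
      bGo rest [] ((if buf.isEmpty then tokens else tokens ++ [buf]) ++ [[c]])
    else if PySem.Chars.isspace c then
      bGo rest [] (if buf.isEmpty then tokens else tokens ++ [buf])
    else
      bGo rest (buf ++ [c]) tokens

def split_wordbreak_alt (command : String) : String × Int :=
  let tokens := bGo command.toList [] []
  (String.ofList (PySem.Chars.join [' '] tokens), (tokens.length : Int) - 1)

-- ===== PRECONDITION & SPEC =====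
def Spec_split_wordbreak (command : String) (out : String × Int) : Prop := out = split_wordbreak_alt command
instance (command : String) (out : String × Int) : Decidable (Spec_split_wordbreak command out) := by unfold Spec_split_wordbreak; infer_instance

-- ===== CLAIM (what is proved, stated in full; the proofs are below) =====
def Claim_equal_split_wordbreak : Prop := ∀ (command : String), Dom_split_wordbreak command → Spec_split_wordbreak command (split_wordbreak command)

-- ===== LEMMAS AND PROOFS =====

-- A's padding of a single letter
def padWB (c : Char) : List Char :=
  if c ∈ compWordbreaks then [' '] ++ [c] ++ [' '] else [c]

-- defining equations of split₀.go and bGo, as rewrite rules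
lemma go_nil (cur : List Char) (acc : List (List Char)) :
    PySem.Chars.split₀.go [] cur acc
      = if cur.isEmpty then acc.reverse else (cur.reverse :: acc).reverse := rfl

lemma go_cons (x : Char) (s cur : List Char) (acc : List (List Char)) :
    PySem.Chars.split₀.go (x :: s) cur acc
      = if PySem.Chars.isspace x then
          (if cur.isEmpty then PySem.Chars.split₀.go s [] acc
           else PySem.Chars.split₀.go s [] (cur.reverse :: acc))
        else PySem.Chars.split₀.go s (x :: cur) acc := rfl

lemma bGo_nil (buf : List Char) (tokens : List (List Char)) :
    bGo [] buf tokens = if buf.isEmpty then tokens else tokens ++ [buf] := rfl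

lemma bGo_cons (c : Char) (rest buf : List Char) (tokens : List (List Char)) :
    bGo (c :: rest) buf tokens
      = if c ∈ wbSet then
          bGo rest [] ((if buf.isEmpty then tokens else tokens ++ [buf]) ++ [[c]])
        else if PySem.Chars.isspace c then
          bGo rest [] (if buf.isEmpty then tokens else tokens ++ [buf])
        else bGo rest (buf ++ [c]) tokens := rfl

lemma vals_eq_flatMap (cs : List Char) (acc : List Char) :
    cs.foldl aStep acc = acc ++ cs.flatMap padWB := by
  induction cs generalizing acc with
  | nil => simp
  | cons c rest ih =>
    simp only [List.foldl_cons, List.flatMap_cons, aStep, padWB]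
    split_ifs with h <;> rw [ih] <;> simp

-- every non-whitespace member of COMP_WORDBREAKS is in B's _WB
lemma mem_wbSet_of_mem (c : Char) (h : c ∈ compWordbreaks)
    (hs : PySem.Chars.isspace c = false) : c ∈ wbSet := by
  simp only [compWordbreaks, List.mem_cons, List.not_mem_nil, or_false] at h
  rcases h with h|h|h|h|h|h|h|h|h|h|h|h|h|h <;> subst h <;>
    first | decide | (exfalso; revert hs; decide)

-- members of B's _WB are members of COMP_WORDBREAKS and not whitespace
lemma wbSet_sub (c : Char) (h : c ∈ wbSet) :
    c ∈ compWordbreaks ∧ PySem.Chars.isspace c = false := by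
  simp only [wbSet, List.mem_cons, List.not_mem_nil, or_false] at h
  rcases h with h|h|h|h|h|h|h|h|h|h <;> subst h <;> exact ⟨by decide, by decide⟩

-- B's token accumulator only ever grows on the right
lemma bGo_accum (cs : List Char) (buf : List Char) (tokens : List (List Char)) :
    bGo cs buf tokens = tokens ++ bGo cs buf [] := by
  induction cs generalizing buf tokens with
  | nil => by_cases h : buf.isEmpty <;> simp [bGo_nil, h]
  | cons c rest ih =>
    rw [bGo_cons, bGo_cons]
    by_cases h1 : c ∈ wbSet
    · rw [if_pos h1, if_pos h1]
      by_cases hb : buf.isEmpty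
      · rw [if_pos hb, if_pos hb, ih, ih [] ([] ++ [[c]])]
        simp
      · rw [if_neg hb, if_neg hb, ih, ih [] ([] ++ [buf] ++ [[c]])]
        simp
    · by_cases h2 : PySem.Chars.isspace c = true
      · rw [if_neg h1, if_neg h1, if_pos h2, if_pos h2]
        by_cases hb : buf.isEmpty
        · rw [if_pos hb, if_pos hb, ih]
        · rw [if_neg hb, if_neg hb, ih, ih [] ([] ++ [buf])]
          simp
      · rw [if_neg h1, if_neg h1, if_neg h2, if_neg h2]
        exact ih (buf ++ [c]) tokens

-- main invariant: A's split₀ state machine over the padded stream tracks B's tokenizer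
lemma go_eq_bGo (cs : List Char) (cur : List Char) (acc : List (List Char)) :
    PySem.Chars.split₀.go (cs.flatMap padWB) cur acc
      = acc.reverse ++ bGo cs cur.reverse [] := by
  induction cs generalizing cur acc with
  | nil =>
    by_cases h : cur.isEmpty <;>
      simp [go_nil, bGo_nil, h, List.isEmpty_reverse]
  | cons c rest ih =>
    have hsp : PySem.Chars.isspace ' ' = true := by decide
    have hac1 := bGo_accum rest [] [[c]]
    have hac2 := bGo_accum rest [] [cur.reverse]
    have hac3 := bGo_accum rest [] [cur.reverse, [c]]
    simp only [List.flatMap_cons, padWB]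
    by_cases hwb : c ∈ compWordbreaks
    · rw [if_pos hwb]
      simp only [List.cons_append, List.nil_append]
      by_cases hs : PySem.Chars.isspace c = true
      · have hns : c ∉ wbSet := fun hm => by
          rw [(wbSet_sub c hm).2] at hs; exact absurd hs (by simp)
        by_cases hb : cur.isEmpty
        · simp [go_cons, bGo_cons, hsp, hs, hns, hb, ih]
        · simp [go_cons, bGo_cons, hsp, hs, hns, hb, List.isEmpty_reverse, ih, hac2]
      · have hmem : c ∈ wbSet := mem_wbSet_of_mem c hwb (by simpa using hs)
        by_cases hb : cur.isEmpty
        · simp [go_cons, bGo_cons, hsp, hs, hmem, hb, ih, hac1]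
        · simp [go_cons, bGo_cons, hsp, hs, hmem, hb, List.isEmpty_reverse, ih, hac3]
    · rw [if_neg hwb]
      simp only [List.cons_append, List.nil_append]
      have hns : c ∉ wbSet := fun hm => hwb (wbSet_sub c hm).1
      by_cases hs : PySem.Chars.isspace c = true
      · by_cases hb : cur.isEmpty
        · simp [go_cons, bGo_cons, hs, hns, hb, ih]
        · simp [go_cons, bGo_cons, hs, hns, hb, List.isEmpty_reverse, ih, hac2]
      · have h2 := ih (c :: cur) acc
        simp [go_cons, bGo_cons, hs, hns, h2]

-- ===== VERDICT (by name: the statement is the Claim_ definition above) =====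
theorem split_wordbreak_spec : Claim_equal_split_wordbreak := by
  intro command _
  show _ = _
  unfold split_wordbreak split_wordbreak_alt
  have hv := vals_eq_flatMap command.toList []
  rw [List.nil_append] at hv
  have hsplit : PySem.Chars.split₀ (command.toList.flatMap padWB) = bGo command.toList [] [] := by
    have h := go_eq_bGo command.toList [] []
    simpa [PySem.Chars.split₀] using h
  simp only [hv, hsplit]
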